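-- pv_equiv track=rewrite | github.com/devonjones/StatblockExtractor | statblock/filters.py | page_split_filter
-- ===== SOURCE A (Python) =====
-- def page_split_filter(lines):
-- 	retlines = []
-- 	counter = 0
-- 	lastline = None
-- 	for line in lines:
-- 		if line == lastline:
-- 			if line.startswith("paizo.com"):
-- 				retlines.pop()
-- 				retlines.append("|PAGEEND|\n")
-- 		else:
-- 			retlines.append(line)
-- 		lastline = line
-- 	return retlines
-- ===== SOURCE B (Python) =====
-- def page_split_filter(lines):
--     out = []
--     i = 0
--     n = len(lines)
--     while i < n:
--         j = i + 1
--         while j < n and lines[j] == lines[i]: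
--             j += 1
--         if j - i >= 2 and lines[i].startswith("paizo.com"):
--             out.append("|PAGEEND|\n")
--         else:
--             out.append(lines[i])
--         i = j
--     return out
-- ===== Notes on version B (the rewrite author's own statement) =====
-- stated objective: idiomatic
-- what changed: Replaces A's lastline/pop/append state machine with a two-pointer pass that finds each maximal run of equal lines and emits one output element per run (|PAGEEND| for a duplicated paizo.com run).
import Mathlib
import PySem

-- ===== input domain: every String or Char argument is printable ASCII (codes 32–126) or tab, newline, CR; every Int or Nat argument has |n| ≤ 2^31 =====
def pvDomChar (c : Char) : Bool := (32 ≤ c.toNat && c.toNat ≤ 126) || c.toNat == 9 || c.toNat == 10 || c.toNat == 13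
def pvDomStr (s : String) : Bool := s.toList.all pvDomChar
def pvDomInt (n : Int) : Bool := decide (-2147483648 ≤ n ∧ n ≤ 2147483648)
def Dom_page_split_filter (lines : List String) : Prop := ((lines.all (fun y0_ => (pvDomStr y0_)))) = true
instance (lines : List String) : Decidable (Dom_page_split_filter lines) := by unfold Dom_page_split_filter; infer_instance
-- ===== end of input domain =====

-- B replaces A's lastline/pop/append state machine with a run-grouping pass (one output per maximal run); same O(n) cost, plainer structure.

-- ===== PORT A =====
-- loop state: (retlines, lastline).  Python's retlines.pop() here is dropLast:
-- it is only reached when line == lastline, so the run's first line was just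
-- appended and retlines is nonempty (pop never raises in A).
def pvLoopA : List String → List String → Option String → List String
  | [], ret, _ => ret
  | l :: ls, ret, last =>
    if some l = last then
      if PySem.Str.startswith l "paizo.com" then
        pvLoopA ls (ret.dropLast ++ ["|PAGEEND|\n"]) (some l)
      else
        pvLoopA ls ret (some l)
    else
      pvLoopA ls (ret ++ [l]) (some l)

def page_split_filter (lines : List String) : List String :=
  pvLoopA lines [] none

-- ===== PORT B =====
-- one output element per maximal run of equal lines (Source B's two-pointer scan:
-- the inner while j loop is the takeWhile/dropWhile split of the run)
def pvRuns : List String → List String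
  | [] => []
  | l :: rest =>
    let run := rest.takeWhile (fun x => x == l)
    let rest' := rest.dropWhile (fun x => x == l)
    (if 2 ≤ run.length + 1 ∧ PySem.Str.startswith l "paizo.com" = true then "|PAGEEND|\n" else l)
      :: pvRuns rest'
termination_by ls => ls.length
decreasing_by
  simp only [List.length_cons]
  exact Nat.lt_succ_of_le (List.length_dropWhile_le _ _)

def page_split_filter_alt (lines : List String) : List String :=
  pvRuns lines

-- ===== PRECONDITION & SPEC =====
def Spec_page_split_filter (lines : List String) (out : List String) : Prop := out = page_split_filter_alt lines
instance (lines : List String) (out : List String) : Decidable (Spec_page_split_filter lines out) := by unfold Spec_page_split_filter; infer_instance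

-- ===== CLAIM (what is proved, stated in full; the proofs are below) =====
def Claim_equal_page_split_filter : Prop := ∀ (lines : List String), Dom_page_split_filter lines → Spec_page_split_filter lines (page_split_filter lines)

-- ===== LEMMAS AND PROOFS =====

-- skipping a run of duplicates of l: the accumulator's last element becomes
-- |PAGEEND| iff the run is nonempty and l starts with "paizo.com"
theorem pvLoopA_skip_run (run : List String) :
    ∀ (rest ret : List String) (c l : String), (∀ x ∈ run, x = l) →
    pvLoopA (run ++ rest) (ret ++ [c]) (some l)
      = pvLoopA rest
          (ret ++ [if run ≠ [] ∧ PySem.Str.startswith l "paizo.com" = true then "|PAGEEND|\n" else c])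
          (some l) := by
  induction run with
  | nil => intro rest ret c l _; simp
  | cons x run' ih =>
    intro rest ret c l h
    have hx : x = l := h x (List.mem_cons_self ..)
    subst hx
    by_cases hpz : PySem.Str.startswith x "paizo.com" = true
    · rw [List.cons_append, pvLoopA, if_pos rfl, if_pos hpz, List.dropLast_concat]
      rw [ih rest ret "|PAGEEND|\n" x (fun y hy => h y (List.mem_cons_of_mem _ hy))]
      rw [ite_self, if_pos ⟨by simp, hpz⟩]
    · rw [List.cons_append, pvLoopA, if_pos rfl, if_neg hpz]
      rw [ih rest ret c x (fun y hy => h y (List.mem_cons_of_mem _ hy))]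
      rw [if_neg (fun hh => hpz hh.2), if_neg (fun hh => hpz hh.2)]

theorem pvLoopA_eq_runs (n : ℕ) :
    ∀ (ls ret : List String) (last : Option String), ls.length ≤ n →
    (∀ k, last = some k → ls.head? ≠ some k) →
    pvLoopA ls ret last = ret ++ pvRuns ls := by
  induction n with
  | zero =>
    intro ls ret last hlen _
    have : ls = [] := List.eq_nil_of_length_eq_zero (Nat.le_zero.mp hlen)
    subst this; simp [pvLoopA, pvRuns]
  | succ n ih =>
    intro ls ret last hlen hlast
    cases ls with
    | nil => simp [pvLoopA, pvRuns]
    | cons l ls' =>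
      have hne : ¬ (some l = last) := by
        intro h; exact hlast l h.symm (by simp)
      rw [pvLoopA, if_neg hne]
      have hsplit : ls' = ls'.takeWhile (fun x => x == l) ++ ls'.dropWhile (fun x => x == l) :=
        (List.takeWhile_append_dropWhile).symm
      set run := ls'.takeWhile (fun x => x == l) with hrun
      set rest := ls'.dropWhile (fun x => x == l) with hrest
      have hmem : ∀ x ∈ run, x = l := by
        intro x hx
        have := List.mem_takeWhile_imp hx
        simpa using this
      rw [show pvLoopA ls' (ret ++ [l]) (some l)
            = pvLoopA (run ++ rest) (ret ++ [l]) (some l) by rw [← hsplit]]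
      rw [pvLoopA_skip_run run rest ret l l hmem]
      have hrestlen : rest.length ≤ n := by
        have h1 : rest.length ≤ ls'.length := List.length_dropWhile_le _ _
        have h2 : ls'.length ≤ n := by simpa using Nat.lt_succ_iff.mp (Nat.lt_of_lt_of_le (by simp) hlen)
        omega
      have hresthead : ∀ k, (some l : Option String) = some k → rest.head? ≠ some k := by
        intro k hk hhd
        cases hk
        cases hr : rest with
        | nil => rw [hr] at hhd; simp at hhd
        | cons r rs =>
          rw [hr] at hhd
          simp at hhd
          have hnot := List.head?_dropWhile_not (fun x => x == l) ls'
          rw [← hrest, hr] at hnot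
          simp only [List.head?_cons] at hnot
          rw [hhd] at hnot
          simp at hnot
      rw [ih rest _ (some l) hrestlen hresthead]
      rw [pvRuns]
      simp only [← hrun, ← hrest]
      have hcond : (2 ≤ run.length + 1 ∧ PySem.Str.startswith l "paizo.com" = true)
          ↔ (run ≠ [] ∧ PySem.Str.startswith l "paizo.com" = true) := by
        constructor
        · rintro ⟨h1, h2⟩
          refine ⟨?_, h2⟩
          intro hh; rw [hh] at h1; simp at h1
        · rintro ⟨h1, h2⟩
          refine ⟨?_, h2⟩
          have : 0 < run.length := List.length_pos_of_ne_nil h1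
          omega
      by_cases hc : run ≠ [] ∧ PySem.Str.startswith l "paizo.com" = true
      · rw [if_pos hc, if_pos (hcond.mpr hc)]; simp
      · rw [if_neg hc, if_neg (fun h => hc (hcond.mp h))]; simp

-- ===== VERDICT (by name: the statement is the Claim_ definition above) =====
theorem page_split_filter_spec : Claim_equal_page_split_filter := by
  intro lines _
  unfold Spec_page_split_filter page_split_filter page_split_filter_alt
  rw [pvLoopA_eq_runs lines.length lines [] none (le_refl _) (by intro k h; cases h)]
  simp
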